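-- pv_equiv track=rewrite | github.com/SoheilSaya/Unlim-challenges | shahre ajib.py | min_additional_floors
-- ===== SOURCE A (Python) =====
-- def min_additional_floors(n, building_floors):
--     floor_counts = {}
--     additional_floors = 0
--
--     for floor in building_floors:
--         if floor in floor_counts:
--             # Increment floor count until it's unique
--             while floor in floor_counts:
--                 floor += 1
--                 additional_floors += 1
--
--         # Update floor count dictionary
--         floor_counts[floor] = 1
--
--     return additional_floors
-- ===== SOURCE B (Python) =====
-- def min_additional_floors(n, building_floors):
--     additional = 0
--     next_free = None
--     for v in sorted(building_floors):
--         if next_free is None or v > next_free: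
--             next_free = v + 1
--         else:
--             additional += next_free - v
--             next_free += 1
--     return additional
-- ===== Notes on version B (the rewrite author's own statement) =====
-- stated objective: faster
-- what changed: Replaces A's dict-based linear probing (for each floor, increment one step at a time while the slot is taken) with a sort followed by a single greedy pass that tracks the next free slot, using the order-independence of the total displacement.
import Mathlib
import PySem

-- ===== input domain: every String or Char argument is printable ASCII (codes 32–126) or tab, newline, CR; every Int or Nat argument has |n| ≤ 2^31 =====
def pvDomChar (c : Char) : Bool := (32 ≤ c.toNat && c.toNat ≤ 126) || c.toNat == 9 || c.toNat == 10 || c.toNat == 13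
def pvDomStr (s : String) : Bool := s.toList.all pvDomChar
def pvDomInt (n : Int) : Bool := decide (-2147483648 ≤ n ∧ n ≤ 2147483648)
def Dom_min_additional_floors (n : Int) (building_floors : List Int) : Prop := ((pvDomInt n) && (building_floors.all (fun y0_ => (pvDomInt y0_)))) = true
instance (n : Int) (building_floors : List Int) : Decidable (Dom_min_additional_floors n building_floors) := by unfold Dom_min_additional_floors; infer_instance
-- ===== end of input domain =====

-- B replaces A's per-element linear probing in a dict (quadratic on duplicate-heavy input)
-- by sort-then-one-greedy-pass tracking the next free slot; objective: faster (O(n log n)).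

-- ===== PORT A =====
-- the 'while floor in floor_counts: floor += 1; additional_floors += 1' loop; fuel = dict size
-- is a pure totality guard (the loop can never run longer than the number of occupied slots)
def pvBumpA (d : PySem.Dict Int Int) (floor acc : Int) (fuel : Nat) : Int × Int :=
  match fuel with
  | 0 => (floor, acc)
  | Nat.succ f => if d.contains floor then pvBumpA d (floor + 1) (acc + 1) f else (floor, acc)

-- one iteration of A's 'for floor in building_floors' body
def pvStepA (s : PySem.Dict Int Int × Int) (floor : Int) : PySem.Dict Int Int × Int :=
  let r := if s.1.contains floor then pvBumpA s.1 floor s.2 s.1.size else (floor, s.2)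
  (s.1.insert r.1 1, r.2)

def min_additional_floors (n : Int) (building_floors : List Int) : Int :=
  (building_floors.foldl pvStepA (PySem.Dict.empty, 0)).2

-- ===== PORT B =====
-- one iteration of B's loop over sorted(building_floors); state = (additional, next_free)
def pvStepB (s : Int × Option Int) (v : Int) : Int × Option Int :=
  match s.2 with
  | none => (s.1, some (v + 1))
  | some nf => if nf < v then (s.1, some (v + 1)) else (s.1 + (nf - v), some (nf + 1))

def min_additional_floors_alt (n : Int) (building_floors : List Int) : Int :=
  ((PySem.List.sorted building_floors (fun x => x) false).foldl pvStepB (0, none)).1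

-- ===== PRECONDITION & SPEC =====
def Spec_min_additional_floors (n : Int) (building_floors : List Int) (out : Int) : Prop := out = min_additional_floors_alt n building_floors
instance (n : Int) (building_floors : List Int) (out : Int) : Decidable (Spec_min_additional_floors n building_floors out) := by unfold Spec_min_additional_floors; infer_instance

-- ===== CLAIM (what is proved, stated in full; the proofs are below) =====
def Claim_equal_min_additional_floors : Prop := ∀ (n : Int) (building_floors : List Int), Dom_min_additional_floors n building_floors → Spec_min_additional_floors n building_floors (min_additional_floors n building_floors)

-- ===== LEMMAS AND PROOFS =====

-- `pvFF x S` = the first free slot ≥ x w.r.t. the occupied finite set S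
theorem pvFreeEx (x : Int) (S : Finset Int) : ∃ k : Nat, x + (k : Int) ∉ S := by
  by_contra h
  push_neg at h
  have hmap : ∀ k : Fin (S.card + 1), k ∈ (Finset.univ : Finset (Fin (S.card + 1))) →
      x + ((k : Nat) : Int) ∈ S := fun k _ => h k
  have hinj : Set.InjOn (fun k : Fin (S.card + 1) => x + ((k : Nat) : Int))
      ((Finset.univ : Finset (Fin (S.card + 1))) : Set (Fin (S.card + 1))) := by
    intro a _ b _ hab
    simp only [add_right_inj, Int.natCast_inj] at hab
    exact Fin.ext hab
  have := Finset.card_le_card_of_injOn _ hmap hinj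
  simp at this

def pvFF (x : Int) (S : Finset Int) : Int := x + (Nat.find (pvFreeEx x S) : Int)

theorem pvFF_not_mem (x : Int) (S : Finset Int) : pvFF x S ∉ S := Nat.find_spec (pvFreeEx x S)

theorem le_pvFF (x : Int) (S : Finset Int) : x ≤ pvFF x S := by
  have : (0 : Int) ≤ (Nat.find (pvFreeEx x S) : Int) := Int.natCast_nonneg _
  unfold pvFF; omega

theorem mem_of_lt_pvFF {x m : Int} {S : Finset Int} (h1 : x ≤ m) (h2 : m < pvFF x S) :
    m ∈ S := by
  have hj : (m - x).toNat < Nat.find (pvFreeEx x S) := by unfold pvFF at h2; omega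
  have := Nat.find_min (pvFreeEx x S) hj
  simp only [not_not] at this
  have hx : x + ((m - x).toNat : Int) = m := by omega
  rwa [hx] at this

theorem pvFF_le {x m : Int} {S : Finset Int} (h1 : x ≤ m) (h2 : m ∉ S) : pvFF x S ≤ m := by
  by_contra hlt
  exact h2 (mem_of_lt_pvFF h1 (by omega))

theorem pvFF_eq {x m : Int} {S : Finset Int} (h1 : m ∉ S) (h2 : x ≤ m)
    (h3 : ∀ j, x ≤ j → j < m → j ∈ S) : pvFF x S = m := by
  refine le_antisymm (pvFF_le h2 h1) ?_
  by_contra hlt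
  exact pvFF_not_mem x S (h3 _ (le_pvFF x S) (by omega))

theorem pvFF_of_not_mem {x : Int} {S : Finset Int} (h : x ∉ S) : pvFF x S = x :=
  pvFF_eq h le_rfl (fun j h1 h2 => absurd h1 (by omega))

-- the order-free abstract process: occupy the first free slot, pay the displacement
def pvStep (p : Finset Int × Int) (x : Int) : Finset Int × Int :=
  (insert (pvFF x p.1) p.1, p.2 + (pvFF x p.1 - x))

theorem pvStep_comm_le {x y : Int} (p : Finset Int × Int) (h : x ≤ y) :
    pvStep (pvStep p x) y = pvStep (pvStep p y) x := by
  obtain ⟨S, t⟩ := p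
  by_cases hlt : pvFF x S < y
  · -- the two insertions do not interact
    have hb' : pvFF y (insert (pvFF x S) S) = pvFF y S := by
      refine pvFF_eq ?_ (le_pvFF y S) (fun j h1 h2 => Finset.mem_insert_of_mem (mem_of_lt_pvFF h1 h2))
      simp only [Finset.mem_insert]
      push_neg
      exact ⟨by have := le_pvFF y S; omega, pvFF_not_mem y S⟩
    have hb : pvFF x (insert (pvFF y S) S) = pvFF x S := by
      refine pvFF_eq ?_ (le_pvFF x S) (fun j h1 h2 => Finset.mem_insert_of_mem (mem_of_lt_pvFF h1 h2))
      simp only [Finset.mem_insert]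
      push_neg
      exact ⟨by have := le_pvFF y S; omega, pvFF_not_mem x S⟩
    simp only [pvStep, hb, hb']
    refine Prod.ext ?_ (by dsimp; ring)
    exact Finset.insert_comm _ _ _
  · -- both first inserts land on the same slot a := pvFF x S
    push_neg at hlt
    have haa : pvFF y S = pvFF x S :=
      pvFF_eq (pvFF_not_mem x S) hlt
        (fun j h1 h2 => mem_of_lt_pvFF (le_trans h h1) h2)
    have hxa : x ≤ pvFF x S := le_pvFF x S
    have hchain : ∀ z : Int, x ≤ z → z ≤ pvFF x S →
        pvFF z (insert (pvFF x S) S) = pvFF (pvFF x S + 1) (insert (pvFF x S) S) := by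
      intro z hxz hza
      refine pvFF_eq (pvFF_not_mem _ _)
        (by have := le_pvFF (pvFF x S + 1) (insert (pvFF x S) S); omega) ?_
      intro j h1 h2
      rcases lt_trichotomy j (pvFF x S) with hj | hj | hj
      · exact Finset.mem_insert_of_mem (mem_of_lt_pvFF (le_trans hxz h1) hj)
      · exact hj ▸ Finset.mem_insert_self _ _
      · exact mem_of_lt_pvFF (show pvFF x S + 1 ≤ j by omega) h2
    have hbx : pvFF x (insert (pvFF x S) S) = pvFF (pvFF x S + 1) (insert (pvFF x S) S) :=
      hchain x le_rfl hxa
    have hby : pvFF y (insert (pvFF x S) S) = pvFF (pvFF x S + 1) (insert (pvFF x S) S) :=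
      hchain y h hlt
    simp only [pvStep, haa, hbx, hby]
    refine Prod.ext rfl (by dsimp; ring)
  
theorem pvStep_comm (p : Finset Int × Int) (x y : Int) :
    pvStep (pvStep p x) y = pvStep (pvStep p y) x := by
  rcases le_total x y with h | h
  · exact pvStep_comm_le p h
  · exact (pvStep_comm_le p h).symm

-- A's while loop computes the first free slot and pays the displacement
theorem pvBumpA_eq (d : PySem.Dict Int Int) (S : Finset Int)
    (hS : ∀ m : Int, d.contains m = true ↔ m ∈ S) :
    ∀ (fuel : Nat) (floor acc : Int), (pvFF floor S - floor).toNat ≤ fuel →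
      pvBumpA d floor acc fuel = (pvFF floor S, acc + (pvFF floor S - floor)) := by
  intro fuel
  induction fuel with
  | zero =>
    intro floor acc hf
    have h1 := le_pvFF floor S
    have h2 : pvFF floor S = floor := by omega
    simp [pvBumpA, h2]
  | succ f ih =>
    intro floor acc hf
    by_cases hc : d.contains floor = true
    · have hmem : floor ∈ S := (hS floor).1 hc
      have hne : pvFF floor S ≠ floor := fun h => pvFF_not_mem floor S (by rw [h]; exact hmem)
      have hgt : floor < pvFF floor S := lt_of_le_of_ne (le_pvFF floor S) (Ne.symm hne)
      have hff : pvFF floor S = pvFF (floor + 1) S := by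
        refine pvFF_eq (m := pvFF (floor + 1) S) (pvFF_not_mem _ _)
          (by have := le_pvFF (floor + 1) S; omega) ?_
        intro j h1 h2
        rcases eq_or_lt_of_le h1 with h' | h'
        · exact h' ▸ hmem
        · exact mem_of_lt_pvFF (by omega) h2
      have hbound : (pvFF (floor + 1) S - (floor + 1)).toNat ≤ f := by
        rw [← hff]; omega
      simp only [pvBumpA, hc, if_true]
      rw [ih (floor + 1) (acc + 1) hbound, ← hff]
      refine Prod.ext rfl (by dsimp; ring)
    · have hnm : floor ∉ S := fun h => hc ((hS floor).2 h)
      have h2 : pvFF floor S = floor := pvFF_of_not_mem hnm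
      simp [pvBumpA, hc, h2]

theorem pvFF_sub_le_card (x : Int) (S : Finset Int) : (pvFF x S - x).toNat ≤ S.card := by
  have hsub : Finset.Ico x (pvFF x S) ⊆ S := by
    intro m hm
    rw [Finset.mem_Ico] at hm
    exact mem_of_lt_pvFF hm.1 hm.2
  have := Finset.card_le_card hsub
  rwa [Int.card_Ico] at this

-- A's fold is the abstract process, in A's input order
theorem pvFoldA_eq (l : List Int) :
    ∀ (d : PySem.Dict Int Int) (acc : Int) (S : Finset Int) (t : Int),
      d.keys.Nodup → S = d.keys.toFinset → acc = t →
      (l.foldl pvStepA (d, acc)).2 = (l.foldl pvStep (S, t)).2 := by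
  induction l with
  | nil => intro d acc S t _ _ h; simpa using h
  | cons x l ih =>
    intro d acc S t hnd hSd hacc
    have hS : ∀ m : Int, d.contains m = true ↔ m ∈ S := by
      intro m
      rw [hSd, PySem.Dict.contains_iff_mem_keys, List.mem_toFinset]
    have hsize : S.card ≤ d.size := by
      rw [hSd, List.toFinset_card_of_nodup hnd]
      simp [PySem.Dict.keys, PySem.Dict.size]
    have hr : (if d.contains x then pvBumpA d x acc d.size else (x, acc))
        = (pvFF x S, acc + (pvFF x S - x)) := by
      by_cases hc : d.contains x = true
      · rw [if_pos hc]
        exact pvBumpA_eq d S hS d.size x acc (le_trans (pvFF_sub_le_card x S) hsize)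
      · have hnm : x ∉ S := fun h => hc ((hS x).2 h)
        rw [if_neg hc, pvFF_of_not_mem hnm]
        refine Prod.ext rfl (by dsimp; ring)
    simp only [List.foldl_cons]
    have hstepA : pvStepA (d, acc) x = (d.insert (pvFF x S) 1, acc + (pvFF x S - x)) := by
      simp only [pvStepA, hr]
    rw [hstepA]
    refine ih _ _ _ _ (PySem.Dict.nodup_keys_insert d _ _ hnd) ?_ (by rw [hacc])
    ext m
    simp only [List.mem_toFinset, PySem.Dict.mem_keys_insert, Finset.mem_insert, hSd]

-- B's single pass over a sorted list is the abstract process on that list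
theorem pvFoldB_eq (l : List Int) :
    ∀ (ans nf : Int) (S : Finset Int) (t : Int),
      l.Pairwise (· ≤ ·) →
      (∀ m : Int, nf ≤ m → m ∉ S) →
      (∀ v ∈ l, ∀ m : Int, v ≤ m → m < nf → m ∈ S) →
      ans = t →
      (l.foldl pvStepB (ans, some nf)).1 = (l.foldl pvStep (S, t)).2 := by
  induction l with
  | nil => intro ans nf S t _ _ _ h; simpa using h
  | cons v l ih =>
    intro ans nf S t hpw hup hdn hacc
    rw [List.pairwise_cons] at hpw
    obtain ⟨hv, hpw⟩ := hpw
    simp only [List.foldl_cons]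
    by_cases hvn : nf < v
    · -- fresh block: first free slot is v itself, cost 0
      have hffv : pvFF v S = v := pvFF_of_not_mem (hup v (by omega))
      have hstep : pvStep (S, t) v = (insert v S, t) := by
        simp only [pvStep, hffv]
        refine Prod.ext rfl (by dsimp; ring)
      rw [hstep, show pvStepB (ans, some nf) v = (ans, some (v + 1)) by
        simp [pvStepB, hvn]]
      refine ih ans (v + 1) _ t hpw ?_ ?_ hacc
      · intro m hm
        simp only [Finset.mem_insert, not_or]
        exact ⟨by omega, hup m (by omega)⟩
      · intro v' hv' m h1 h2
        have : m = v := by have := hv v' hv'; omega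
        exact this ▸ Finset.mem_insert_self _ _
    · -- v ≤ nf: slot nf is taken, pay nf - v
      push_neg at hvn
      have hffv : pvFF v S = nf :=
        pvFF_eq (hup nf le_rfl) hvn (fun j h1 h2 => hdn v List.mem_cons_self j h1 h2)
      have hstep : pvStep (S, t) v = (insert nf S, t + (nf - v)) := by
        simp only [pvStep, hffv]
      rw [hstep, show pvStepB (ans, some nf) v = (ans + (nf - v), some (nf + 1)) by
        simp [pvStepB, not_lt.mpr hvn]]
      refine ih _ (nf + 1) _ _ hpw ?_ ?_ (by omega)
      · intro m hm
        simp only [Finset.mem_insert, not_or]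
        exact ⟨by omega, hup m (by omega)⟩
      · intro v' hv' m h1 h2
        rcases eq_or_lt_of_le (show m ≤ nf by omega) with h' | h'
        · exact h' ▸ Finset.mem_insert_self _ _
        · exact Finset.mem_insert_of_mem
            (hdn v List.mem_cons_self m (le_trans (hv v' hv') h1) h')

-- ===== VERDICT (by name: the statement is the Claim_ definition above) =====
theorem min_additional_floors_spec : Claim_equal_min_additional_floors := by
  intro n l _
  unfold Spec_min_additional_floors min_additional_floors min_additional_floors_alt
  have hA : (l.foldl pvStepA (PySem.Dict.empty, 0)).2 = (l.foldl pvStep (∅, 0)).2 := by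
    refine pvFoldA_eq l PySem.Dict.empty 0 ∅ 0 ?_ ?_ rfl
    · simp [PySem.Dict.keys_empty]
    · simp [PySem.Dict.keys_empty]
  have hperm : (PySem.List.sorted l (fun x => x) false).Perm l := PySem.List.sorted_perm l _ _
  have hP : l.foldl pvStep ((∅ : Finset Int), 0)
      = (PySem.List.sorted l (fun x => x) false).foldl pvStep (∅, 0) :=
    (hperm.foldl_eq' (fun x _ y _ z => pvStep_comm z x y) _).symm
  rw [hA, hP]
  rcases hs : PySem.List.sorted l (fun x => x) false with _ | ⟨v, rest⟩
  · simp
  · have hpw : (v :: rest).Pairwise (· ≤ ·) := by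
      have := PySem.List.sorted_pairwise (xs := l) (key := fun x => x)
      rwa [hs] at this
    rw [List.pairwise_cons] at hpw
    obtain ⟨hv, hpw⟩ := hpw
    simp only [List.foldl_cons]
    have hB1 : pvStepB (0, none) v = (0, some (v + 1)) := rfl
    have hA1 : pvStep ((∅ : Finset Int), 0) v = ({v}, 0) := by
      simp only [pvStep]
      rw [pvFF_of_not_mem (Finset.notMem_empty v)]
      refine Prod.ext (by simp) (by dsimp; ring)
    rw [hB1, hA1]
    refine (pvFoldB_eq rest 0 (v + 1) {v} 0 hpw ?_ ?_ rfl).symm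
    · intro m hm
      simp only [Finset.mem_singleton]
      omega
    · intro v' hv' m h1 h2
      have : m = v := by have := hv v' hv'; omega
      simp [this]
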